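-- pv_equiv track=rewrite | github.com/mverschu/AppLockerCloud | backend/app/xml_generator.py | _determine_rule_type
-- ===== SOURCE A (Python) =====
-- from typing import List, Dict, Any, Optional, Tuple
--
-- def _determine_rule_type(conditions: List[Dict[str, Any]]) -> str:
--     """Determine the XML rule element type based on conditions."""
--     if not conditions:
--         return "FilePathRule"
--
--     condition_types = [cond.get("type", "") for cond in conditions]
--
--     # If all conditions are hash conditions, use FileHashRule
--     if all(ct == "FileHashCondition" for ct in condition_types):
--         return "FileHashRule"
--
--     # If all conditions are publisher conditions, use FilePublisherRule
--     if all(ct == "FilePublisherCondition" for ct in condition_types):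
--         return "FilePublisherRule"
--
--     # Otherwise, use FilePathRule (default)
--     return "FilePathRule"
-- ===== SOURCE B (Python) =====
-- from typing import List, Dict, Any
--
-- _RULE_BY_TYPE = {
--     "FileHashCondition": "FileHashRule",
--     "FilePublisherCondition": "FilePublisherRule",
-- }
--
-- def _determine_rule_type(conditions: List[Dict[str, Any]]) -> str:
--     """Determine the XML rule element type based on conditions."""
--     if not conditions:
--         return "FilePathRule"
--     # Dispatch on the first condition's type, then verify the rest match it,
--     # bailing out early on the first mismatch.
--     t0 = conditions[0].get("type", "")
--     rule = _RULE_BY_TYPE.get(t0)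
--     if rule is None:
--         return "FilePathRule"
--     for cond in conditions[1:]:
--         if cond.get("type", "") != t0:
--             return "FilePathRule"
--     return rule
-- ===== Notes on version B (the rewrite author's own statement) =====
-- stated objective: alternative
-- what changed: Instead of materialising all condition types and running two all()-scans (one per rule kind), B dispatches on the first condition's type through a lookup table and then makes a single early-exit pass checking that the remaining conditions share that type.
import Mathlib
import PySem

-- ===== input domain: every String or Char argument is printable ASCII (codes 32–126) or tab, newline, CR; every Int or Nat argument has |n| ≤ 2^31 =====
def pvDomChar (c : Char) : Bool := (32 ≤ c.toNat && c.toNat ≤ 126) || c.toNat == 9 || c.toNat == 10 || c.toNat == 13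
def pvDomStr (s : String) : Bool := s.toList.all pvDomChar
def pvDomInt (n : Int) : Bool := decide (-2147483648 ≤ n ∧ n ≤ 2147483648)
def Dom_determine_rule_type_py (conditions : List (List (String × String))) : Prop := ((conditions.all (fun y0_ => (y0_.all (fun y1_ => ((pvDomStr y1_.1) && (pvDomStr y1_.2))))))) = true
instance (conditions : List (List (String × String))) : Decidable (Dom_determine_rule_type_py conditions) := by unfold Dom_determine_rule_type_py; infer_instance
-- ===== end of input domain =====

-- B replaces A's two all()-scans over the full list of condition types with a table-dispatch
-- on the first condition's type followed by a single early-exit pass over the rest (alternative decomposition).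


-- ===== PORT A =====
def determine_rule_type_py (conditions : List (List (String × String))) : String :=
  if conditions = [] then "FilePathRule"
  else
    let condition_types := conditions.map (fun cond => PySem.Dict.getD (PySem.Dict.mk cond) "type" "")
    if condition_types.all (fun ct => ct == "FileHashCondition") then "FileHashRule"
    else if condition_types.all (fun ct => ct == "FilePublisherCondition") then "FilePublisherRule"
    else "FilePathRule"

-- ===== PORT B =====
-- the module-level _RULE_BY_TYPE table
def ruleByType : PySem.Dict String String :=
  PySem.Dict.mk [("FileHashCondition", "FileHashRule"), ("FilePublisherCondition", "FilePublisherRule")]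

-- the early-exit 'for cond in conditions[1:]' loop: True iff no mismatch is hit
def restMatches (t0 : String) : List (List (String × String)) → Bool
  | [] => true
  | cond :: rest =>
      if PySem.Dict.getD (PySem.Dict.mk cond) "type" "" ≠ t0 then false
      else restMatches t0 rest

def determine_rule_type_py_alt (conditions : List (List (String × String))) : String :=
  match conditions with
  | [] => "FilePathRule"
  | c0 :: rest =>
    let t0 := PySem.Dict.getD (PySem.Dict.mk c0) "type" ""
    match PySem.Dict.get? ruleByType t0 with
    | none => "FilePathRule"
    | some rule => if restMatches t0 rest then rule else "FilePathRule"

-- ===== PRECONDITION & SPEC =====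
def Spec_determine_rule_type_py (conditions : List (List (String × String))) (out : String) : Prop := out = determine_rule_type_py_alt conditions
instance (conditions : List (List (String × String))) (out : String) : Decidable (Spec_determine_rule_type_py conditions out) := by unfold Spec_determine_rule_type_py; infer_instance

-- ===== CLAIM (what is proved, stated in full; the proofs are below) =====
def Claim_equal_determine_rule_type_py : Prop := ∀ (conditions : List (List (String × String))), Dom_determine_rule_type_py conditions → Spec_determine_rule_type_py conditions (determine_rule_type_py conditions)

-- ===== LEMMAS AND PROOFS =====

-- the early-exit loop decides exactly "every remaining condition has type t0"
theorem restMatches_eq_all (t0 : String) (l : List (List (String × String))) :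
    restMatches t0 l = l.all (fun c => PySem.Dict.getD (PySem.Dict.mk c) "type" "" == t0) := by
  induction l with
  | nil => rfl
  | cons c rest ih =>
      simp only [restMatches, List.all_cons, ih]
      by_cases h : PySem.Dict.getD (PySem.Dict.mk c) "type" "" = t0 <;> simp [h]

-- ===== VERDICT (by name: the statement is the Claim_ definition above) =====
theorem determine_rule_type_py_spec : Claim_equal_determine_rule_type_py := by
  intro conditions _
  unfold Spec_determine_rule_type_py determine_rule_type_py determine_rule_type_py_alt
  match conditions with
  | [] => rfl
  | c0 :: rest =>
    simp only [List.map_cons, List.all_cons, restMatches_eq_all, List.all_map]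
    set t0 := PySem.Dict.getD (PySem.Dict.mk c0) "type" "" with ht0
    by_cases h1 : t0 = "FileHashCondition"
    · simp [h1, ruleByType, PySem.Dict.get?]
    · by_cases h2 : t0 = "FilePublisherCondition"
      · simp [h2, ruleByType, PySem.Dict.get?]
      · have hg : PySem.Dict.get? ruleByType t0 = none := by
          simp [ruleByType, PySem.Dict.get?]
          exact ⟨fun h => h1 h.symm, fun h => h2 h.symm⟩
        simp [hg, h1, h2]
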